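-- pv_equiv track=rewrite | github.com/mcci-usb/Cricket | src/usb4tree/winusb4parse.py | get_level_data
-- ===== SOURCE A (Python) =====
-- def get_level_data(u4tbuf):
--     """
--     Organizes data based on levels and returns a dictionary.
--
--     Parameters:
--         u4tbuf: The input data dictionary to be processed.
--
--     Returns:
--         dict: A dictionary organizing data items based on their level.
--     """
--     rkarr = list(u4tbuf.keys())
--     pdict = {}
--     for rkitem in rkarr:
--         lcnt = rkitem.count(',')
--         kl = list(pdict.keys())
--         if 'level'+str(lcnt) in kl:
--             pdict['level'+str(lcnt)].append(rkitem)
--         else: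
--             pdict['level'+str(lcnt)] = [rkitem]
--     return pdict
-- ===== SOURCE B (Python) =====
-- def get_level_data(u4tbuf):
--     keys = list(u4tbuf.keys())
--     levels = list(dict.fromkeys(k.count(',') for k in keys))
--     return {'level' + str(c): [k for k in keys if k.count(',') == c] for c in levels}
-- ===== Notes on version B (the rewrite author's own statement) =====
-- stated objective: simpler
-- what changed: Replaces the accumulating membership-test loop over a growing dict with a two-pass decomposition: first collect the distinct comma-counts in order of first appearance (dict.fromkeys), then build the result as one dict comprehension filtering the keys per level.
import Mathlib
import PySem

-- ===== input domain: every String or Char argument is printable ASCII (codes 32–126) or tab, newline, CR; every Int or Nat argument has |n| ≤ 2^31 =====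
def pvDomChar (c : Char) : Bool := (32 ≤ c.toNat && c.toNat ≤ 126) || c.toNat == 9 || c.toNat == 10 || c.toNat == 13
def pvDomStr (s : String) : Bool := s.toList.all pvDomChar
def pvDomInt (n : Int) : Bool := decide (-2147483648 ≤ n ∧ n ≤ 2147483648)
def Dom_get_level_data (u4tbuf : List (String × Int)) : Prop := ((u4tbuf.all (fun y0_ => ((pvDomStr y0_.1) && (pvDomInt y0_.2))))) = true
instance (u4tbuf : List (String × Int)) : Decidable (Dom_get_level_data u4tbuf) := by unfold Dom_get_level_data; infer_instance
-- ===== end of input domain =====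

-- B replaces A's accumulating membership-test loop over a growing dict by a two-pass
-- decomposition (distinct comma-counts first, then one filter per level); objective: simpler.

-- ===== PORT A =====
-- A iterates over the dict's keys, growing pdict: append to the level bucket if the
-- level key is already present, else start a new bucket.
-- 'list(u4tbuf.keys())' ported as first-occurrence dedup of the association list's keys.
def get_level_data (u4tbuf : List (String × Int)) : List (String × List String) :=
  let rkarr := PySem.List.dedup (u4tbuf.map (·.1))
  let pdict := rkarr.foldl (fun pdict rkitem =>
      let lcnt : Int := (PySem.Str.count rkitem "," : Int)
      let kl := pdict.keys
      if ("level" ++ PySem.Int.toStr lcnt) ∈ kl then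
        pdict.modify ("level" ++ PySem.Int.toStr lcnt) [] (fun l => l ++ [rkitem])
      else
        pdict.insert ("level" ++ PySem.Int.toStr lcnt) [rkitem]
    ) (PySem.Dict.empty : PySem.Dict String (List String))
  pdict.items

-- ===== PORT B =====
-- B: distinct comma-counts in order of first appearance (dict.fromkeys = PySem.List.dedup),
-- then one dict-comprehension entry per level, filtering the keys.
def get_level_data_alt (u4tbuf : List (String × Int)) : List (String × List String) :=
  let keys := PySem.List.dedup (u4tbuf.map (·.1))
  let levels := PySem.List.dedup (keys.map (fun k => (PySem.Str.count k "," : Int)))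
  levels.map (fun c =>
    ("level" ++ PySem.Int.toStr c, keys.filter (fun k => (PySem.Str.count k "," : Int) == c)))

-- ===== PRECONDITION & SPEC =====
def Spec_get_level_data (u4tbuf : List (String × Int)) (out : List (String × List String)) : Prop := out = get_level_data_alt u4tbuf
instance (u4tbuf : List (String × Int)) (out : List (String × List String)) : Decidable (Spec_get_level_data u4tbuf out) := by unfold Spec_get_level_data; infer_instance

-- ===== CLAIM (what is proved, stated in full; the proofs are below) =====
def Claim_equal_get_level_data : Prop := ∀ (u4tbuf : List (String × Int)), Dom_get_level_data u4tbuf → Spec_get_level_data u4tbuf (get_level_data u4tbuf)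

-- ===== LEMMAS AND PROOFS =====

-- value of a decimal digit character; inverts Nat.digitChar on digits 0..9
def pvDigitVal (c : Char) : Nat := c.toNat - 48

-- read a most-significant-first digit list (as produced by Nat.toDigits 10) back into a number
def pvFromD (acc : Nat) (ds : List Char) : Nat :=
  ds.foldl (fun a c => a * 10 + pvDigitVal c) acc

theorem pvDigitVal_digitChar (d : Nat) (h : d < 10) : pvDigitVal (Nat.digitChar d) = d := by
  interval_cases d <;> decide

-- one unfolding step of Nat.toDigitsCore at positive fuel
theorem pvToDigitsCore_succ (f n : Nat) (ds : List Char) :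
    Nat.toDigitsCore 10 (f + 1) n ds
      = if n / 10 = 0 then Nat.digitChar (n % 10) :: ds
        else Nat.toDigitsCore 10 f (n / 10) (Nat.digitChar (n % 10) :: ds) := by
  rw [Nat.toDigitsCore.eq_def]

theorem pvFromD_nil (acc : Nat) : pvFromD acc [] = acc := rfl

theorem pvFromD_cons (acc : Nat) (c : Char) (cs : List Char) :
    pvFromD acc (c :: cs) = pvFromD (acc * 10 + pvDigitVal c) cs := by
  simp [pvFromD]

theorem pvFromD_toDigitsCore (f : Nat) : ∀ (n acc : Nat) (ds : List Char), n ≤ f →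
    pvFromD acc (Nat.toDigitsCore 10 (f + 1) n ds)
      = pvFromD (acc * 10 ^ (Nat.log 10 n + 1) + n) ds := by
  induction f with
  | zero =>
    intro n acc ds hn
    interval_cases n
    rw [pvToDigitsCore_succ, if_pos (by norm_num), pvFromD_cons]
    have h0 : pvDigitVal (Nat.digitChar (0 % 10)) = 0 := by decide
    rw [h0]
    norm_num
  | succ f ih =>
    intro n acc ds hn
    rw [pvToDigitsCore_succ]
    by_cases h10 : n / 10 = 0
    · have hlt : n < 10 := by omega
      rw [if_pos h10, pvFromD_cons, pvDigitVal_digitChar _ (Nat.mod_lt _ (by norm_num)),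
          Nat.log_eq_zero_iff.mpr (Or.inl hlt)]
      simp [Nat.mod_eq_of_lt hlt]
    · have hge : 10 ≤ n := by
        by_contra hc
        exact h10 (Nat.div_eq_of_lt (by omega))
      rw [if_neg h10, ih (n / 10) acc _ (by omega)]
      rw [pvFromD_cons, pvDigitVal_digitChar _ (Nat.mod_lt _ (by norm_num))]
      have hlog : Nat.log 10 (n / 10) + 1 = Nat.log 10 n := by
        have h1 : 0 < Nat.log 10 n := Nat.log_pos (by norm_num) hge
        have h2 := Nat.log_div_base 10 n
        omega
      have hdm : n / 10 * 10 + n % 10 = n := Nat.div_add_mod' n 10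
      congr 1
      rw [← hlog]
      ring_nf
      omega

theorem pvFromD_toDigits (n : Nat) : pvFromD 0 (Nat.toDigits 10 n) = n := by
  rw [Nat.toDigits, pvFromD_toDigitsCore n n 0 [] le_rfl, pvFromD_nil]
  simp

-- the level-key builder is injective on the (nonnegative) comma counts
theorem pvKey_inj (m n : Nat)
    (h : "level" ++ PySem.Int.toStr (m : Int) = "level" ++ PySem.Int.toStr (n : Int)) : m = n := by
  have h2 := congrArg String.toList h
  rw [String.toList_append, String.toList_append] at h2
  have h3 := List.append_cancel_left h2
  rw [PySem.Int.toList_toStr, PySem.Int.toList_toStr] at h3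
  simp only [PySem.Int.toChars, if_neg (not_lt.mpr (Int.natCast_nonneg m)),
    if_neg (not_lt.mpr (Int.natCast_nonneg n)), Int.toNat_natCast] at h3
  calc m = pvFromD 0 (Nat.toDigits 10 m) := (pvFromD_toDigits m).symm
    _ = pvFromD 0 (Nat.toDigits 10 n) := by rw [h3]
    _ = n := pvFromD_toDigits n

-- PySem.Set.ofList commutes with an injective map
theorem pvOfList_map {α β : Type} [DecidableEq α] [DecidableEq β] (f : α → β)
    (hinj : ∀ a b, f a = f b → a = b) (l : List α) :
    PySem.Set.ofList (l.map f) = (PySem.Set.ofList l).map f := by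
  suffices h : ∀ (s : PySem.Set α),
      List.foldl PySem.Set.add (s.map f) (l.map f) = (List.foldl PySem.Set.add s l).map f by
    simpa [PySem.Set.ofList, PySem.Set.empty] using h PySem.Set.empty
  induction l with
  | nil => intro s; rfl
  | cons x xs ih =>
    intro s
    have hmem : (f x ∈ List.map f s) ↔ x ∈ s := by
      constructor
      · intro h
        obtain ⟨a, ha, hfa⟩ := List.mem_map.mp h
        exact (hinj a x hfa) ▸ ha
      · exact List.mem_map_of_mem
    have hc : PySem.Set.contains (List.map f s) (f x) = PySem.Set.contains s x := by
      refine Bool.eq_iff_iff.mpr ?_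
      simp only [PySem.Set.contains, List.contains_iff_exists_mem_beq, beq_iff_eq]
      constructor
      · rintro ⟨y, hy, rfl⟩
        obtain ⟨a, ha, hfa⟩ := List.mem_map.mp hy
        exact ⟨a, ha, (hinj a x hfa).symm⟩
      · rintro ⟨b, hb, rfl⟩
        exact ⟨f x, List.mem_map_of_mem hb, rfl⟩
    have hadd : PySem.Set.add (s.map f) (f x) = (PySem.Set.add s x).map f := by
      simp only [PySem.Set.add, hc]
      split_ifs with h
      · rfl
      · simp
    rw [List.map_cons, List.foldl_cons, List.foldl_cons, hadd, ih]

-- the loop body of A is unconditionally a 'modify' (append-to-bucket, creating it when absent)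
theorem pvStep_eq (d : PySem.Dict String (List String)) (x : String) (k : String) :
    (if k ∈ d.keys then d.modify k [] (fun l => l ++ [x]) else d.insert k [x])
      = d.modify k [] (fun l => l ++ [x]) := by
  by_cases h : k ∈ d.keys
  · rw [if_pos h]
  · have hcf : d.contains k = false := by
      rw [Bool.eq_false_iff]
      intro hc
      exact h ((PySem.Dict.contains_iff_mem_keys d k).mp hc)
    rw [if_neg h, PySem.Dict.modify, PySem.Dict.getD_of_not_contains _ _ hcf]
    rfl

-- the two bucket keys compare equal exactly when the counts do
theorem pvBeq_key (a : String) (cntN : String → Nat) (n : Nat) :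
    (("level" ++ PySem.Int.toStr ((cntN a : Int))) == ("level" ++ PySem.Int.toStr ((n : Nat) : Int)))
      = (((cntN a : Int)) == ((n : Nat) : Int)) := by
  by_cases h : cntN a = n
  · rw [h]; simp
  · have h1 : ("level" ++ PySem.Int.toStr ((cntN a : Int))) ≠ ("level" ++ PySem.Int.toStr ((n : Nat) : Int)) :=
      fun hk => h (pvKey_inj _ _ hk)
    have h2 : ((cntN a : Int)) ≠ ((n : Nat) : Int) := by exact_mod_cast h
    rw [beq_eq_false_iff_ne.mpr h1, beq_eq_false_iff_ne.mpr h2]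

-- core equivalence between A's loop and B's two-pass construction
theorem pvCore (cntN : String → Nat) (l : List String) :
    (l.foldl (fun d x =>
        if ("level" ++ PySem.Int.toStr ((cntN x : Int))) ∈ d.keys then
          d.modify ("level" ++ PySem.Int.toStr ((cntN x : Int))) [] (fun v => v ++ [x])
        else d.insert ("level" ++ PySem.Int.toStr ((cntN x : Int))) [x])
      (PySem.Dict.empty : PySem.Dict String (List String))).items
    = (PySem.List.dedup (l.map (fun k => ((cntN k : Int))))).map (fun c =>
        ("level" ++ PySem.Int.toStr c, l.filter (fun k => ((cntN k : Int)) == c))) := by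
  have hfold : (l.foldl (fun d x =>
        if ("level" ++ PySem.Int.toStr ((cntN x : Int))) ∈ d.keys then
          d.modify ("level" ++ PySem.Int.toStr ((cntN x : Int))) [] (fun v => v ++ [x])
        else d.insert ("level" ++ PySem.Int.toStr ((cntN x : Int))) [x])
      (PySem.Dict.empty : PySem.Dict String (List String)))
      = l.foldl (fun d x =>
          d.modify ("level" ++ PySem.Int.toStr ((cntN x : Int))) [] (fun v => v ++ [x]))
          PySem.Dict.empty :=
    congrArg (fun g => List.foldl g (PySem.Dict.empty : PySem.Dict String (List String)) l)
      (funext fun d => funext fun x =>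
        pvStep_eq d x ("level" ++ PySem.Int.toStr ((cntN x : Int))))
  rw [hfold]
  have hnodup : (l.foldl (fun d x =>
      d.modify ("level" ++ PySem.Int.toStr ((cntN x : Int))) [] (fun v => v ++ [x]))
      PySem.Dict.empty).keys.Nodup :=
    PySem.Dict.nodup_keys_foldl_modify_key l (fun x => "level" ++ PySem.Int.toStr ((cntN x : Int)))
      [] (fun _ x v => v ++ [x]) _ PySem.Dict.nodup_keys_empty
  rw [PySem.Dict.items_eq_map_keys _ hnodup []]
  have hkeys : (l.foldl (fun d x =>
      d.modify ("level" ++ PySem.Int.toStr ((cntN x : Int))) [] (fun v => v ++ [x]))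
      PySem.Dict.empty).keys
      = PySem.Set.ofList (l.map (fun x => "level" ++ PySem.Int.toStr ((cntN x : Int)))) := by
    rw [PySem.Dict.keys_foldl_modify_key l (fun x => "level" ++ PySem.Int.toStr ((cntN x : Int)))
      [] (fun _ x v => v ++ [x])]
    exact PySem.Set.update_empty _
  have hgetD : ∀ c, (l.foldl (fun d x =>
      d.modify ("level" ++ PySem.Int.toStr ((cntN x : Int))) [] (fun v => v ++ [x]))
      PySem.Dict.empty).getD c []
      = l.filter (fun x => ("level" ++ PySem.Int.toStr ((cntN x : Int))) == c) := by
    intro c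
    have hm : l.foldl (fun d x =>
        d.modify ("level" ++ PySem.Int.toStr ((cntN x : Int))) [] (fun v => v ++ [x]))
        PySem.Dict.empty
        = (l.map (fun x => ("level" ++ PySem.Int.toStr ((cntN x : Int)), x))).foldl
            (fun d p => d.modify p.1 [] (fun v => v ++ [p.2])) PySem.Dict.empty := by
      rw [List.foldl_map]
    rw [hm, PySem.Dict.getD_foldl_modify_append, PySem.Dict.getD_empty, List.filter_map]
    simp [Function.comp_def]
  simp only [hgetD, hkeys]
  -- factor both deduplicated lists through the list of counts
  have hA : (l.map (fun x => "level" ++ PySem.Int.toStr ((cntN x : Int))))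
      = (l.map cntN).map (fun n : Nat => "level" ++ PySem.Int.toStr ((n : Int))) := by
    rw [List.map_map]; rfl
  have hB : (l.map (fun k => ((cntN k : Int)))) = (l.map cntN).map (fun n : Nat => (n : Int)) := by
    rw [List.map_map]; rfl
  rw [hA, hB, PySem.List.dedup,
    pvOfList_map (fun n : Nat => "level" ++ PySem.Int.toStr ((n : Int))) (fun a b => pvKey_inj a b),
    pvOfList_map (fun n : Nat => (n : Int)) (fun a b h => Nat.cast_injective h),
    List.map_map, List.map_map]
  refine congrArg (fun g => List.map g (PySem.Set.ofList (l.map cntN))) (funext fun n => ?_)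
  simp only [Function.comp_def]
  exact congrArg (fun p => ("level" ++ PySem.Int.toStr ((n : Int)), List.filter p l))
    (funext fun a => pvBeq_key a cntN n)

theorem get_level_data_eq (u4tbuf : List (String × Int)) :
    get_level_data u4tbuf = get_level_data_alt u4tbuf := by
  unfold get_level_data get_level_data_alt
  exact pvCore (fun k => PySem.Str.count k ",") (PySem.List.dedup (u4tbuf.map (·.1)))

-- ===== VERDICT (by name: the statement is the Claim_ definition above) =====
theorem get_level_data_spec : Claim_equal_get_level_data := by
  intro u _
  unfold Spec_get_level_data
  exact get_level_data_eq u
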